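-- pv_equiv track=rewrite | github.com/manwar/perlweeklychallenge-club | challenge-345/vinod-k/python/ch-2.py | process_ints
-- ===== SOURCE A (Python) =====
-- def process_ints(ints):
--     seen = []
--     ans = []
--     i = 0
--     while i < len(ints):
--         if ints[i] == -1:
--             x = 0
--             j = i - 1
--             while j >= 0 and ints[j] == -1:
--                 x += 1
--                 j -= 1
--             if x < len(seen):
--                 ans.append(seen[x])
--             else:
--                 ans.append(-1)
--         else:
--             seen.insert(0, ints[i])
--         i += 1
--     return ans
-- ===== SOURCE B (Python) =====
-- def process_ints(ints):
--     seen = []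
--     ans = []
--     run = 0  # length of the current run of consecutive -1 markers just seen
--     for v in ints:
--         if v == -1:
--             ans.append(seen[-1 - run] if run < len(seen) else -1)
--             run += 1
--         else:
--             seen.append(v)
--             run = 0
--     return ans
-- ===== Notes on version B (the rewrite author's own statement) =====
-- stated objective: faster
-- what changed: Single forward pass that appends values and indexes seen from the end, maintaining a running counter of consecutive -1 markers instead of re-scanning backwards and inserting at the front of the list.
import Mathlib
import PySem

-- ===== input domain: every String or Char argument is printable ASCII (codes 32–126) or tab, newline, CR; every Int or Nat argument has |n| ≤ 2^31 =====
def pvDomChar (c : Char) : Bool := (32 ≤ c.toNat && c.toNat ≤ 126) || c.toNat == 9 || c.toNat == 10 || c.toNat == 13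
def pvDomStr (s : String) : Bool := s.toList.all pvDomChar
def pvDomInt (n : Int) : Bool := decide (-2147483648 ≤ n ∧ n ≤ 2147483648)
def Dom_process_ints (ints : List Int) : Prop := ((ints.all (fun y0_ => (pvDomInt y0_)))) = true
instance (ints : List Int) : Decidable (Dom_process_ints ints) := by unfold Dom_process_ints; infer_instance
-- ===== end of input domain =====

-- B replaces A's quadratic backward re-scan and front insertion by a single forward pass
-- with a running consecutive--1 counter and appends; return values are proved equal (objective: faster).

-- ===== PORT A =====
-- inner while loop: 'x = 0; j = i-1; while j >= 0 and ints[j] == -1: x += 1; j -= 1'.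
-- State is j encoded as a Nat (argument jp = j+1, so 0 means j = -1 and the loop stops).
def pvInnerA (ints : List Int) : Nat → Nat
  | 0 => 0
  | jp + 1 => if ints.getD jp 0 = -1 then pvInnerA ints jp + 1 else 0
  -- ints.getD jp 0 is exact for Python ints[j]: the loop keeps 0 ≤ j < i ≤ len(ints)

-- outer while loop over i, with seen and ans as accumulators
def pvOuterA (ints : List Int) (i : Nat) (seen ans : List Int) : List Int :=
  if h : i < ints.length then
    if ints[i] = -1 then
      let x := pvInnerA ints i
      if x < seen.length then
        pvOuterA ints (i + 1) seen (ans ++ [seen.getD x 0])   -- seen[x], in range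
      else
        pvOuterA ints (i + 1) seen (ans ++ [-1])
    else
      pvOuterA ints (i + 1) (ints[i] :: seen) ans             -- seen.insert(0, ints[i])
  else ans
termination_by ints.length - i

def process_ints (ints : List Int) : List Int :=
  pvOuterA ints 0 [] []

-- ===== PORT B =====
-- the single 'for v in ints' loop with state (seen, run, ans)
def pvLoopB : List Int → List Int → Nat → List Int → List Int
  | [], _, _, ans => ans
  | v :: rest, seen, run, ans =>
    if v = -1 then
      pvLoopB rest seen (run + 1)
        (ans ++ [if run < seen.length
                 then (PySem.List.pyGet? seen (-(((run + 1 : Nat)) : Int))).getD 0  -- seen[-1-run], in range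
                 else -1])
    else
      pvLoopB rest (seen ++ [v]) 0 ans

def process_ints_alt (ints : List Int) : List Int :=
  pvLoopB ints [] 0 []

-- ===== PRECONDITION & SPEC =====
def Spec_process_ints (ints : List Int) (out : List Int) : Prop := out = process_ints_alt ints
instance (ints : List Int) (out : List Int) : Decidable (Spec_process_ints ints out) := by unfold Spec_process_ints; infer_instance

-- ===== CLAIM (what is proved, stated in full; the proofs are below) =====
def Claim_equal_process_ints : Prop := ∀ (ints : List Int), Dom_process_ints ints → Spec_process_ints ints (process_ints ints)

-- ===== LEMMAS AND PROOFS =====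

-- B's negative index hits the (len-1-run)-th element, which is A's seen.reverse[run]
lemma pvGet_neg_eq (seen : List Int) (run : Nat) (h : run < seen.length) :
    (PySem.List.pyGet? seen (-(((run + 1 : Nat)) : Int))).getD 0 = seen.reverse.getD run 0 := by
  have hg := PySem.List.pyGet?_neg_natCast seen (run + 1) (by omega) (by omega)
  have e : (-(((run + 1 : Nat)) : Int)) = (-(((run : Int) + 1))) := by push_cast; ring
  rw [e] at hg ⊢
  rw [hg]
  rw [List.getD_eq_getElem?_getD, List.getElem?_reverse h]
  congr 2
  omega

-- the running counter equals A's backward scan count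
lemma pvInnerA_succ_of_neg (ints : List Int) (i : Nat) (h : i < ints.length)
    (hv : ints[i] = -1) : pvInnerA ints (i + 1) = pvInnerA ints i + 1 := by
  simp [pvInnerA, List.getD_eq_getElem?_getD, List.getElem?_eq_getElem h, hv]

lemma pvInnerA_succ_of_pos (ints : List Int) (i : Nat) (h : i < ints.length)
    (hv : ¬ ints[i] = -1) : pvInnerA ints (i + 1) = 0 := by
  simp [pvInnerA, List.getD_eq_getElem?_getD, List.getElem?_eq_getElem h, hv]

-- drop i peels off the current element
lemma pvDrop_succ (ints : List Int) (i : Nat) (h : i < ints.length) :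
    ints.drop i = ints[i] :: ints.drop (i + 1) := by
  rw [List.drop_eq_getElem_cons h]

-- main invariant: A at index i with seen = seenB.reverse matches B on the remaining suffix
lemma pvOuter_eq_loop (ints : List Int) : ∀ (i : Nat) (seenB ans : List Int),
    pvOuterA ints i seenB.reverse ans = pvLoopB (ints.drop i) seenB (pvInnerA ints i) ans := by
  intro i
  induction' hk : ints.length - i using Nat.strong_induction_on with k ih generalizing i
  intro seenB ans
  by_cases h : i < ints.length
  · rw [pvDrop_succ ints i h]
    by_cases hv : ints[i] = -1
    · rw [pvOuterA]
      simp only [dif_pos h, if_pos hv]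
      rw [pvLoopB]
      simp only [if_pos hv]
      have hstep := pvInnerA_succ_of_neg ints i h hv
      by_cases hx : pvInnerA ints i < seenB.reverse.length
      · have hx' : pvInnerA ints i < seenB.length := by simpa using hx
        rw [if_pos hx, if_pos hx']
        rw [pvGet_neg_eq seenB _ hx']
        rw [ih (ints.length - (i + 1)) (by omega) (i + 1) rfl seenB _]
        rw [hstep]
      · have hx' : ¬ pvInnerA ints i < seenB.length := by simpa using hx
        rw [if_neg hx, if_neg hx']
        rw [ih (ints.length - (i + 1)) (by omega) (i + 1) rfl seenB _]
        rw [hstep]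
    · rw [pvOuterA]
      simp only [dif_pos h, if_neg hv]
      rw [pvLoopB]
      simp only [if_neg hv]
      have : ints[i] :: seenB.reverse = (seenB ++ [ints[i]]).reverse := by simp
      rw [this, ih (ints.length - (i + 1)) (by omega) (i + 1) rfl (seenB ++ [ints[i]]) ans]
      rw [pvInnerA_succ_of_pos ints i h hv]
  · rw [pvOuterA]
    simp only [dif_neg h]
    rw [List.drop_eq_nil_of_le (by omega)]
    rfl

-- ===== VERDICT (by name: the statement is the Claim_ definition above) =====
theorem process_ints_spec : Claim_equal_process_ints := by
  intro ints _
  show process_ints ints = process_ints_alt ints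
  have := pvOuter_eq_loop ints 0 [] []
  simpa [process_ints, process_ints_alt, pvInnerA] using this
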